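-- pv_equiv track=rewrite | github.com/Chaoat/CS-pattern-reduction | BinPacking.py | ProcessStripsIntoDictionary
-- ===== SOURCE A (Python) =====
-- def ProcessStripsIntoDictionary(sizes):
--     """
--     Converts a list of strips into a dictionary of strips
--     :param sizes: The strips
--     :return: The dictionary of the input strips
--     """
--     returnDictionary = {}
--     for i in sizes:
--         try:
--             returnDictionary[str(i)]['amount'] += 1
--         except KeyError:
--             returnDictionary[str(i)] = {'amount':1, 'strip':i}
--     return returnDictionary
-- ===== SOURCE B (Python) =====
-- def ProcessStripsIntoDictionary(sizes):
--     """
--     Converts a list of strips into a dictionary of strips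
--     :param sizes: The strips
--     :return: The dictionary of the input strips
--     """
--     counts = {}
--     for i in sizes:
--         counts[str(i)] = counts.get(str(i), 0) + 1
--     reps = {}
--     for i in sizes:
--         reps.setdefault(str(i), i)
--     return {k: {'amount': c, 'strip': reps[k]} for k, c in counts.items()}
-- ===== Notes on version B (the rewrite author's own statement) =====
-- stated objective: idiomatic
-- what changed: Replaces the fused try/except single loop with two simple passes (a count pass and a first-representative pass via setdefault) followed by a dict-comprehension assembly.
import Mathlib
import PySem

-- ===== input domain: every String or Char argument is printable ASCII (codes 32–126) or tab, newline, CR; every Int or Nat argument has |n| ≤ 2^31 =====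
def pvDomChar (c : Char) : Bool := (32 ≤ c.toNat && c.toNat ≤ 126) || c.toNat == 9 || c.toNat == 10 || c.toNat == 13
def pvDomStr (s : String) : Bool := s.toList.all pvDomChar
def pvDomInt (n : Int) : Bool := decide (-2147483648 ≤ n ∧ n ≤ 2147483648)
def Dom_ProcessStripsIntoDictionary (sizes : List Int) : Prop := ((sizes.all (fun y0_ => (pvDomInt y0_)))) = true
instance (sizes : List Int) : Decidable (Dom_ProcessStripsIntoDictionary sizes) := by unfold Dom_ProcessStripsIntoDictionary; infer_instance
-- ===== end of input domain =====

-- B replaces A's fused try/except loop with a count pass, a first-representative pass, and an assembly step (idiomatic; same cost).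

-- ===== PORT A =====
-- the try/except: on hit, the inner dict's 'amount' is bumped in place ('amount' is always
-- present, so inner.modify with default 0 is exact); on KeyError a fresh inner dict is inserted.
def ProcessStripsIntoDictionary (sizes : List Int) : List (String × List (String × Int)) :=
  (sizes.foldl
    (fun d i =>
      match d.get? (PySem.Int.toStr i) with
      | some inner => d.insert (PySem.Int.toStr i) (inner.modify "amount" 0 (· + 1))
      | none => d.insert (PySem.Int.toStr i) (PySem.Dict.ofList [("amount", 1), ("strip", i)]))
    PySem.Dict.empty).items.map (fun p => (p.1, p.2.items))

-- ===== PORT B =====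
-- 'reps[k]' in Source B never raises (counts and reps have the same keys), so getD 0 is exact.
def ProcessStripsIntoDictionary_alt (sizes : List Int) : List (String × List (String × Int)) :=
  let counts := sizes.foldl
    (fun d i => d.insert (PySem.Int.toStr i) (d.getD (PySem.Int.toStr i) 0 + 1))
    PySem.Dict.empty
  let reps := sizes.foldl
    (fun d i => d.setdefault (PySem.Int.toStr i) i)
    (PySem.Dict.empty : PySem.Dict String Int)
  counts.items.map (fun p => (p.1, [("amount", p.2), ("strip", reps.getD p.1 0)]))

-- ===== PRECONDITION & SPEC =====
def Spec_ProcessStripsIntoDictionary (sizes : List Int) (out : List (String × List (String × Int))) : Prop := out = ProcessStripsIntoDictionary_alt sizes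
instance (sizes : List Int) (out : List (String × List (String × Int))) : Decidable (Spec_ProcessStripsIntoDictionary sizes out) := by unfold Spec_ProcessStripsIntoDictionary; infer_instance

-- ===== CLAIM (what is proved, stated in full; the proofs are below) =====
def Claim_equal_ProcessStripsIntoDictionary : Prop := ∀ (sizes : List Int), Dom_ProcessStripsIntoDictionary sizes → Spec_ProcessStripsIntoDictionary sizes (ProcessStripsIntoDictionary sizes)

-- ===== LEMMAS AND PROOFS =====

-- lookup through a key-preserving map of the items list
theorem get?_mk_map {β : Type} (l : List (String × Int)) (g : String → Int → β) (k : String) :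
    (PySem.Dict.mk (l.map (fun p => (p.1, g p.1 p.2)))).get? k
      = ((PySem.Dict.mk l).get? k).map (fun c => g k c) := by
  induction l with
  | nil => rfl
  | cons p rest ih =>
    obtain ⟨pk, pv⟩ := p
    simp only [List.map_cons, PySem.Dict.get?_mk_cons]
    by_cases h : pk == k
    · have hk : pk = k := eq_of_beq h
      subst hk; simp
    · simp [h, ih]

-- the inner-dict view used throughout: key ↦ {'amount': count, 'strip': rep}
def pvInner (reps : PySem.Dict String Int) (k : String) (c : Int) : PySem.Dict String Int :=
  PySem.Dict.ofList [("amount", c), ("strip", reps.getD k 0)]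

theorem pvInner_modify (reps : PySem.Dict String Int) (k : String) (c : Int) :
    (pvInner reps k c).modify "amount" 0 (· + 1) = pvInner reps k (c + 1) := by
  rfl

theorem pvInner_items (reps : PySem.Dict String Int) (k : String) (c : Int) :
    (pvInner reps k c).items = [("amount", c), ("strip", reps.getD k 0)] := by
  rfl

theorem pv_inv (sizes : List Int) :
    ∀ (dA : PySem.Dict String (PySem.Dict String Int)) (counts reps : PySem.Dict String Int),
      (∀ k, counts.contains k = reps.contains k) →
      dA = PySem.Dict.mk (counts.items.map (fun p => (p.1, pvInner reps p.1 p.2))) →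
      sizes.foldl
        (fun d i =>
          match d.get? (PySem.Int.toStr i) with
          | some inner => d.insert (PySem.Int.toStr i) (inner.modify "amount" 0 (· + 1))
          | none => d.insert (PySem.Int.toStr i) (PySem.Dict.ofList [("amount", 1), ("strip", i)]))
        dA
      = PySem.Dict.mk
          ((sizes.foldl (fun d i => d.insert (PySem.Int.toStr i) (d.getD (PySem.Int.toStr i) 0 + 1)) counts).items.map
            (fun p => (p.1, pvInner (sizes.foldl (fun d i => d.setdefault (PySem.Int.toStr i) i) reps) p.1 p.2))) := by
  induction sizes with
  | nil => intro dA counts reps hcr hd; simpa using hd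
  | cons x rest ih =>
    intro dA counts reps hcr hd
    simp only [List.foldl_cons]
    by_cases hc : counts.contains (PySem.Int.toStr x)
    · -- key already present
      obtain ⟨c, hget⟩ : ∃ c, counts.get? (PySem.Int.toStr x) = some c := by
        rcases h : counts.get? (PySem.Int.toStr x) with _ | c
        · rw [PySem.Dict.contains_eq_isSome_get?, h] at hc; simp at hc
        · exact ⟨c, rfl⟩
      have hdget : dA.get? (PySem.Int.toStr x) = some (pvInner reps (PySem.Int.toStr x) c) := by
        rw [hd, get?_mk_map, hget]; rfl
      have hdc : dA.contains (PySem.Int.toStr x) = true := by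
        rw [PySem.Dict.contains_eq_isSome_get?, hdget]; rfl
      have hrc : reps.contains (PySem.Int.toStr x) = true := (hcr _).symm.trans hc
      rw [hdget]
      rw [PySem.Dict.setdefault_of_contains _ _ hrc]
      refine ih _ _ _ ?_ ?_
      · intro k
        rw [PySem.Dict.contains_insert]
        by_cases hk : k == PySem.Int.toStr x
        · have : k = PySem.Int.toStr x := eq_of_beq hk
          simp [this, hrc]
        · simp [hk, hcr k]
      · apply PySem.Dict.ext
        rw [PySem.Dict.items_insert_of_contains _ _ hdc, hd]
        simp only [PySem.Dict.items_insert_of_contains _ _ hc]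
        rw [PySem.Dict.getD_of_get?_eq_some _ _ hget]
        simp only [List.map_map]
        apply List.map_congr_left
        intro p _
        by_cases hp : p.1 == PySem.Int.toStr x
        · simp [Function.comp, hp, pvInner_modify]
        · simp [Function.comp, hp]
    · -- fresh key
      have hget : counts.get? (PySem.Int.toStr x) = none := by
        rcases h : counts.get? (PySem.Int.toStr x) with _ | c
        · rfl
        · rw [PySem.Dict.contains_eq_isSome_get?, h] at hc; simp at hc
      have hdget : dA.get? (PySem.Int.toStr x) = none := by
        rw [hd, get?_mk_map, hget]; rfl
      have hdc : dA.contains (PySem.Int.toStr x) = false := by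
        rw [PySem.Dict.contains_eq_isSome_get?, hdget]; rfl
      have hcf : counts.contains (PySem.Int.toStr x) = false := by
        simpa using hc
      have hrc : reps.contains (PySem.Int.toStr x) = false := (hcr _).symm.trans hcf
      rw [hdget]
      rw [PySem.Dict.setdefault_of_not_contains _ _ hrc]
      refine ih _ _ _ ?_ ?_
      · intro k
        rw [PySem.Dict.contains_insert, PySem.Dict.contains_insert]
        by_cases hk : k == PySem.Int.toStr x
        · simp [hk]
        · simp [hk, hcr k]
      · apply PySem.Dict.ext
        rw [PySem.Dict.items_insert_of_not_contains _ _ hdc, hd]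
        simp only [PySem.Dict.items_insert_of_not_contains _ _ hcf]
        rw [PySem.Dict.getD_of_not_contains _ _ hcf]
        simp only [List.map_append, List.map_cons, List.map_nil]
        congr 1
        · apply List.map_congr_left
          intro p hp
          have hpk : p.1 ≠ PySem.Int.toStr x := by
            intro he
            have hm : p.1 ∈ counts.keys := PySem.Dict.mem_keys_of_mem_items _ hp
            rw [he, ← PySem.Dict.contains_iff_mem_keys] at hm
            rw [hm] at hcf
            exact Bool.true_eq_false.mp hcf
          simp [pvInner, PySem.Dict.getD_insert_of_ne _ _ _ hpk]
        · simp [pvInner, PySem.Dict.getD_insert_self]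


-- ===== VERDICT (by name: the statement is the Claim_ definition above) =====
theorem ProcessStripsIntoDictionary_spec : Claim_equal_ProcessStripsIntoDictionary := by
  intro sizes _
  unfold Spec_ProcessStripsIntoDictionary ProcessStripsIntoDictionary ProcessStripsIntoDictionary_alt
  rw [pv_inv sizes PySem.Dict.empty PySem.Dict.empty PySem.Dict.empty (fun k => rfl) rfl]
  simp only [List.map_map]
  apply List.map_congr_left
  intro p _
  simp [Function.comp, pvInner_items]
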